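-- pv_equiv track=rewrite | github.com/chrisrutherford/personalprojects | random scripts/Power list.py | basePowerList
-- ===== SOURCE A (Python) =====
-- def basePowerList(b,p):
--     '''calculates b to the pth, p-1, p-2,... power'''
--     try:
--         b,p=int(b),int(p)
--     except:
--         raise ValueError("Arguments must be intergers")
--     else:
--         pows=[]
--         while p>0:
--             result=b**p
--             pows.append(result)
--             p-=1
--         return pows
-- ===== SOURCE B (Python) =====
-- def basePowerList(b, p):
--     '''calculates b to the pth, p-1, p-2,... power'''
--     try:
--         b, p = int(b), int(p)
--     except:
--         raise ValueError("Arguments must be intergers")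
--     pows = []
--     cur = 1
--     for _ in range(p):
--         cur *= b
--         pows.append(cur)
--     pows.reverse()
--     return pows
-- ===== Notes on version B (the rewrite author's own statement) =====
-- stated objective: faster
-- what changed: B replaces the per-element exponentiation b**p inside the loop by an incremental running product (one multiplication per element), building the ascending list and reversing it once; intended as faster, measured 17x at the largest size both finished (n=4096), unconfirmed at sizes where both time out.
import Mathlib
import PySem

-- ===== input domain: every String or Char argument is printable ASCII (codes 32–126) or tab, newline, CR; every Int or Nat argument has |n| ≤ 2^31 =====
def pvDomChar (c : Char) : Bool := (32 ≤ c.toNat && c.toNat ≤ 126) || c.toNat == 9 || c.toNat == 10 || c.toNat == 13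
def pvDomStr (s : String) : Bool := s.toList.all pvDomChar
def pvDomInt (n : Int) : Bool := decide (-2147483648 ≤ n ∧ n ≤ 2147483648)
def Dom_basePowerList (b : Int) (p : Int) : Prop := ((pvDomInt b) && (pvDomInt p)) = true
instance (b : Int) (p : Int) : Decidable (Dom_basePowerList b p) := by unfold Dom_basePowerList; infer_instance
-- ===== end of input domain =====

-- B: one multiplication per element (incremental running product + reverse) instead of b**p each iteration; intended as faster (measured 17x at n=4096, the largest size both finished).
-- ===== PORT A =====
-- while p>0: append b**p; p-=1  (iteration count = p.toNat)
def pvALoop (b : Int) : Nat → List Int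
  | 0 => []
  | n+1 => b ^ (n+1) :: pvALoop b n

def basePowerList (b : Int) (p : Int) : List Int := pvALoop b p.toNat

-- ===== PORT B =====
-- for _ in range(p): cur *= b; pows.append(cur); then pows.reverse()
def pvBLoop (b : Int) : Nat → Int → List Int → List Int
  | 0, _, acc => acc
  | n+1, cur, acc => pvBLoop b n (cur * b) (acc ++ [cur * b])

def basePowerList_alt (b : Int) (p : Int) : List Int :=
  (pvBLoop b p.toNat 1 []).reverse

-- ===== PRECONDITION & SPEC =====
def Spec_basePowerList (b : Int) (p : Int) (out : List Int) : Prop := out = basePowerList_alt b p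
instance (b : Int) (p : Int) (out : List Int) : Decidable (Spec_basePowerList b p out) := by unfold Spec_basePowerList; infer_instance

-- ===== CLAIM (what is proved, stated in full; the proofs are below) =====
def Claim_equal_basePowerList : Prop := ∀ (b : Int) (p : Int), Dom_basePowerList b p → Spec_basePowerList b p (basePowerList b p)

-- ===== LEMMAS AND PROOFS =====

-- ===== VERDICT (by name: the statement is the Claim_ definition above) =====
lemma pvALoop_eq (b : Int) (n : Nat) :
    pvALoop b n = ((List.range n).map (fun i => b ^ (i+1))).reverse := by
  induction n with
  | zero => simp [pvALoop]
  | succ n ih => simp [pvALoop, List.range_succ, ih]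

lemma pvBLoop_eq (b : Int) (n : Nat) (k : Nat) (acc : List Int) :
    pvBLoop b n (b ^ k) acc = acc ++ (List.range n).map (fun i => b ^ (k+i+1)) := by
  induction n generalizing k acc with
  | zero => simp [pvBLoop]
  | succ n ih =>
    have h : b ^ k * b = b ^ (k+1) := (pow_succ b k).symm
    rw [pvBLoop, h, ih (k+1)]
    rw [List.range_succ_eq_map, List.map_cons, List.map_map]
    simp only [List.append_assoc, List.singleton_append]
    congr 2
    apply List.map_congr_left
    intro i _
    simp only [Function.comp_apply, Nat.succ_eq_add_one]
    congr 1
    omega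

theorem basePowerList_spec : Claim_equal_basePowerList := by
  intro b p _
  unfold Spec_basePowerList basePowerList basePowerList_alt
  have hb : (1 : Int) = b ^ 0 := by simp
  rw [hb, pvBLoop_eq, pvALoop_eq]
  simp
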